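-- pv_equiv track=rewrite | github.com/CURRENTF/HRN | dataset/dataset-v5/data_preprocess_for_transform.py | get_str_from_relations
-- ===== SOURCE A (Python) =====
-- def get_str_from_relations(relations):
--     dict_accu_relation = {}
--     for relation in relations:
--         if relation[0] not in dict_accu_relation:
--             dict_accu_relation[relation[0]] = []
--         dict_accu_relation[relation[0]].append(
--             '[被告' + relation[1] + ']' + relation[2] + '了' + '[被告' + relation[3] + ']')
--     relation_str_list = []
--     for accu in dict_accu_relation:
--         s = '，'.join(dict_accu_relation[accu])
--         # s = '在{}中'.format(accu) + s
--         relation_str_list.append(s)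
--     if relation_str_list:
--         relation_str = '，'.join(relation_str_list)
--     else:
--         relation_str = '无'
--     return relation_str
-- ===== SOURCE B (Python) =====
-- def get_str_from_relations(relations):
--     keys = list(dict.fromkeys(r[0] for r in relations))
--     parts = ['[被告' + r[1] + ']' + r[2] + '了' + '[被告' + r[3] + ']'
--              for k in keys for r in relations if r[0] == k]
--     return '，'.join(parts) if parts else '无'
-- ===== Notes on version B (the rewrite author's own statement) =====
-- stated objective: simpler
-- what changed: Replaces A's dict-of-lists grouping plus two-level join by an ordered dedup of the keys, a per-key filter comprehension, and one flat join (exact since both join levels use the same separator).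
import Mathlib
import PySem

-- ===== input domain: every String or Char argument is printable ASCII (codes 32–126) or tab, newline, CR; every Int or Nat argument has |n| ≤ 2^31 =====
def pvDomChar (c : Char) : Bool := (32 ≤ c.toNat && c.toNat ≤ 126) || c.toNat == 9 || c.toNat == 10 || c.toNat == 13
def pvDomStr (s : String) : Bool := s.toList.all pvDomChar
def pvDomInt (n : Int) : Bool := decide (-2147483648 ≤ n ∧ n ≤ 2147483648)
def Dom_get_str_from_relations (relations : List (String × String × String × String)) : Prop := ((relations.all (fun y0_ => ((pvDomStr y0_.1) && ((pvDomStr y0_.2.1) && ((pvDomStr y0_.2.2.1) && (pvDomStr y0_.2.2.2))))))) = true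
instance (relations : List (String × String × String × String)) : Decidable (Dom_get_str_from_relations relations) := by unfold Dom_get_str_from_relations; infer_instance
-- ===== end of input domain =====

-- B replaces A's dict-of-lists grouping by an ordered dedup of the keys plus a per-key filter
-- comprehension and ONE flat '，'-join (objective: simpler decomposition; not faster).

-- shared helper: the formatted string '[被告'+r[1]+']'+r[2]+'了'+'[被告'+r[3]+']'
-- (Python '+' on strings, ported as concatenation of the code-point lists — exact)
def pvFmt (r : String × String × String × String) : String :=
  String.ofList ("[被告".toList ++ r.2.1.toList ++ "]".toList ++ r.2.2.1.toList
    ++ "了".toList ++ "[被告".toList ++ r.2.2.2.toList ++ "]".toList)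

-- ===== PORT A =====
-- the grouping loop: 'if relation[0] not in d: d[relation[0]] = []' is dict.setdefault;
-- 'd[relation[0]].append(s)' is modify at a present key (dflt [] is never used there)
def pvDictA (relations : List (String × String × String × String)) :
    PySem.Dict String (List String) :=
  relations.foldl
    (fun d r => (d.setdefault r.1 []).modify r.1 [] (fun l => l ++ [pvFmt r]))
    PySem.Dict.empty

def get_str_from_relations (relations : List (String × String × String × String)) : String :=
  let d := pvDictA relations
  -- 'for accu in d: relation_str_list.append('，'.join(d[accu]))'; accu ∈ keys so d[accu] = getD
  let relation_str_list := d.keys.foldl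
    (fun acc k => acc ++ [PySem.Str.join "，" (d.getD k [])]) ([] : List String)
  if relation_str_list ≠ [] then PySem.Str.join "，" relation_str_list else "无"

-- ===== PORT B =====
def get_str_from_relations_alt (relations : List (String × String × String × String)) : String :=
  let keys := PySem.List.dedup (relations.map (fun r => r.1))   -- list(dict.fromkeys(...))
  let parts := keys.flatMap (fun k => (relations.filter (fun r => r.1 == k)).map pvFmt)
  if parts ≠ [] then PySem.Str.join "，" parts else "无"

-- ===== PRECONDITION & SPEC =====
def Spec_get_str_from_relations (relations : List (String × String × String × String)) (out : String) : Prop := out = get_str_from_relations_alt relations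
instance (relations : List (String × String × String × String)) (out : String) : Decidable (Spec_get_str_from_relations relations out) := by unfold Spec_get_str_from_relations; infer_instance

-- ===== CLAIM (what is proved, stated in full; the proofs are below) =====
def Claim_equal_get_str_from_relations : Prop := ∀ (relations : List (String × String × String × String)), Dom_get_str_from_relations relations → Spec_get_str_from_relations relations (get_str_from_relations relations)

-- ===== LEMMAS AND PROOFS =====

-- A's 'setdefault then append' step is one modify (the setdefault only pre-creates the slot)
lemma pv_setdefault_modify (d : PySem.Dict String (List String)) (k : String)
    (f : List String → List String) :
    (d.setdefault k []).modify k [] f = d.modify k [] f := by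
  by_cases h : d.contains k = true
  · rw [PySem.Dict.setdefault_of_contains d _ h]
  · have h' : d.contains k = false := by simpa using h
    have hany : (d.items.any fun p => p.1 == k) = false := by
      simpa [PySem.Dict.contains] using h'
    have hmem : ∀ p ∈ d.items, ¬ p.1 = k := by
      simpa [List.any_eq_false] using hany
    have hnone : d.items.find? (fun p => p.1 == k) = none :=
      List.find?_eq_none.mpr (fun p hp => by simpa using hmem p hp)
    have hid : ∀ g : List String, List.map (fun p => if p.1 = k then (k, g) else p) d.items = d.items := by
      intro g
      calc List.map (fun p => if p.1 = k then (k, g) else p) d.items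
          = List.map id d.items := List.map_congr_left (fun p hp => by simp [hmem p hp])
        _ = d.items := List.map_id d.items
    apply PySem.Dict.ext
    simp [PySem.Dict.setdefault, PySem.Dict.modify, PySem.Dict.insert, PySem.Dict.getD,
      PySem.Dict.get?, PySem.Dict.contains, hany, hnone, List.find?_append, hid]

lemma pv_dictA_eq (relations : List (String × String × String × String)) :
    pvDictA relations =
      (relations.map (fun r => (r.1, pvFmt r))).foldl
        (fun d p => d.modify p.1 [] (fun l => l ++ [p.2])) PySem.Dict.empty := by
  rw [List.foldl_map]
  unfold pvDictA
  simp only [pv_setdefault_modify]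

lemma pv_dictA_keys (relations : List (String × String × String × String)) :
    (pvDictA relations).keys = PySem.Set.ofList (relations.map (fun r => r.1)) := by
  rw [pv_dictA_eq, PySem.Dict.keys_foldl_modify_key, PySem.Dict.keys_empty]
  rw [PySem.Set.update_nil_left]
  simp [List.map_map, Function.comp_def]

lemma pv_dictA_getD (relations : List (String × String × String × String)) (k : String) :
    (pvDictA relations).getD k [] = (relations.filter (fun r => r.1 == k)).map pvFmt := by
  rw [pv_dictA_eq, PySem.Dict.getD_foldl_modify_append, PySem.Dict.getD_empty]
  simp [List.filter_map, List.map_map, Function.comp_def]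

-- joining the groups with sep and joining the results with sep = one flat join (groups nonempty)
lemma pv_chars_join_append (sep : List Char) (xs ys : List (List Char))
    (hx : xs ≠ []) (hy : ys ≠ []) :
    PySem.Chars.join sep (xs ++ ys) =
      PySem.Chars.join sep xs ++ sep ++ PySem.Chars.join sep ys := by
  induction xs with
  | nil => exact absurd rfl hx
  | cons x xs' ih =>
    cases xs' with
    | nil =>
      cases ys with
      | nil => exact absurd rfl hy
      | cons y ys' =>
        simp [PySem.Chars.join_singleton, PySem.Chars.join_cons_cons]
    | cons x' xs'' =>
      have h2 := ih (by simp : x' :: xs'' ≠ [])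
      rw [List.cons_append] at h2
      rw [List.cons_append, List.cons_append, PySem.Chars.join_cons_cons sep x x' (xs'' ++ ys), h2,
        PySem.Chars.join_cons_cons sep x x' xs'']
      simp [List.append_assoc]

lemma pv_chars_join_flat (sep : List Char) (L : List (List (List Char)))
    (h : ∀ g ∈ L, g ≠ []) :
    PySem.Chars.join sep (L.map (PySem.Chars.join sep)) = PySem.Chars.join sep L.flatten := by
  induction L with
  | nil => rfl
  | cons g L' ih =>
    cases L' with
    | nil => simp [PySem.Chars.join_singleton]
    | cons g2 L'' =>
      have hg : g ≠ [] := h g (by simp)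
      have hg2 : g2 ≠ [] := h g2 (by simp)
      have hflat : (g2 :: L'').flatten ≠ [] := by
        cases g2 with
        | nil => exact absurd rfl hg2
        | cons c cs => simp
      have hrest : ∀ x ∈ g2 :: L'', x ≠ [] := fun x hx => h x (by simp [hx])
      calc PySem.Chars.join sep ((g :: g2 :: L'').map (PySem.Chars.join sep))
          = PySem.Chars.join sep g ++ sep ++
              PySem.Chars.join sep ((g2 :: L'').map (PySem.Chars.join sep)) := by
            simp [PySem.Chars.join_cons_cons]
        _ = PySem.Chars.join sep g ++ sep ++ PySem.Chars.join sep (g2 :: L'').flatten := by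
            rw [ih hrest]
        _ = PySem.Chars.join sep (g ++ (g2 :: L'').flatten) := by
            rw [pv_chars_join_append sep g _ hg hflat]
        _ = PySem.Chars.join sep (g :: g2 :: L'').flatten := by simp

lemma pv_join_join (sep : String) (keys : List String) (G : String → List String)
    (h : ∀ k ∈ keys, G k ≠ []) :
    PySem.Str.join sep (keys.map (fun k => PySem.Str.join sep (G k))) =
      PySem.Str.join sep (keys.flatMap G) := by
  have hL : (keys.map (fun k => PySem.Str.join sep (G k))).map String.toList
      = (keys.map (fun k => (G k).map String.toList)).map (PySem.Chars.join sep.toList) := by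
    simp [List.map_map, Function.comp_def, PySem.Str.toList_join]
  have hne : ∀ g ∈ keys.map (fun k => (G k).map String.toList), g ≠ [] := by
    intro g hg
    obtain ⟨k, hk, rfl⟩ := List.mem_map.mp hg
    simp only [ne_eq, List.map_eq_nil_iff]
    exact h k hk
  have hT : (PySem.Str.join sep (keys.map fun k => PySem.Str.join sep (G k))).toList
      = (PySem.Str.join sep (keys.flatMap G)).toList := by
    rw [PySem.Str.toList_join, PySem.Str.toList_join, hL, pv_chars_join_flat sep.toList _ hne]
    congr 1
    rw [List.flatMap_def, List.map_flatten]
    simp [List.map_map, Function.comp_def]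
  exact String.toList_inj.mp hT

-- ===== VERDICT (by name: the statement is the Claim_ definition above) =====
theorem get_str_from_relations_spec : Claim_equal_get_str_from_relations := by
  intro relations _
  unfold Spec_get_str_from_relations get_str_from_relations get_str_from_relations_alt
  simp only [PySem.List.foldl_append_singleton_eq_map, List.nil_append,
    pv_dictA_keys, pv_dictA_getD]
  have hded : PySem.List.dedup (relations.map (fun r => r.1))
      = PySem.Set.ofList (relations.map (fun r => r.1)) := rfl
  rw [hded]
  set keys := PySem.Set.ofList (relations.map (fun r => r.1)) with hkeys
  set G : String → List String :=
    fun k => (relations.filter (fun r => r.1 == k)).map pvFmt with hG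
  have hGne : ∀ k ∈ keys, G k ≠ [] := by
    intro k hk
    have hk' : k ∈ relations.map (fun r => r.1) := (PySem.Set.mem_ofList _ _).mp hk
    obtain ⟨r, hr, hrk⟩ := List.mem_map.mp hk'
    have : r ∈ relations.filter (fun r => r.1 == k) :=
      List.mem_filter.mpr ⟨hr, by simp [hrk]⟩
    simp only [hG, ne_eq, List.map_eq_nil_iff]
    exact List.ne_nil_of_mem this
  by_cases hrel : relations = []
  · subst hrel; rfl
  · have hkne : keys ≠ [] := by
      obtain ⟨r, rs, rfl⟩ := List.exists_cons_of_ne_nil hrel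
      have : r.1 ∈ keys := (PySem.Set.mem_ofList _ _).mpr (by simp)
      exact List.ne_nil_of_mem this
    obtain ⟨k0, ks, hk0⟩ := List.exists_cons_of_ne_nil hkne
    have hmapne : keys.map (fun k => PySem.Str.join "，" (G k)) ≠ [] := by
      simp [List.map_eq_nil_iff, hkne]
    have hpartsne : keys.flatMap G ≠ [] := by
      have hk0m : k0 ∈ keys := by rw [hk0]; simp
      have := hGne k0 hk0m
      obtain ⟨s, hs⟩ := List.exists_mem_of_ne_nil _ this
      exact List.ne_nil_of_mem (List.mem_flatMap.mpr ⟨k0, hk0m, hs⟩)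
    rw [if_pos hmapne, if_pos hpartsne]
    exact pv_join_join "，" keys G hGne
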